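-- pv_equiv track=rewrite | github.com/ikriv-samples/FiveLetters | FiveWords.py | is_five_letter_word
-- ===== SOURCE A (Python) =====
-- EXPECTED_LENGTH = 5
--
-- LETTERS_IN_ALPHABET = 26
--
-- def to_number(c):
--   return ord(c) - ord('a')
--
-- def is_five_letter_word(word):
--   if len(word) != EXPECTED_LENGTH:
--     return False
--   for c in word:
--     b = to_number(c)
--     if b < 0 or b >= LETTERS_IN_ALPHABET:
--       return False
--   return True
-- ===== SOURCE B (Python) =====
-- import re
--
-- _FIVE_LOWER = re.compile(r'[a-z]{5}')
--
-- def is_five_letter_word(word):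
--     return bool(_FIVE_LOWER.fullmatch(word))
-- ===== Notes on version B (the rewrite author's own statement) =====
-- stated objective: idiomatic
-- what changed: Replaces the explicit length guard plus per-character ord-arithmetic loop with a single precompiled regular-expression full match [a-z]{5}.
import Mathlib
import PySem

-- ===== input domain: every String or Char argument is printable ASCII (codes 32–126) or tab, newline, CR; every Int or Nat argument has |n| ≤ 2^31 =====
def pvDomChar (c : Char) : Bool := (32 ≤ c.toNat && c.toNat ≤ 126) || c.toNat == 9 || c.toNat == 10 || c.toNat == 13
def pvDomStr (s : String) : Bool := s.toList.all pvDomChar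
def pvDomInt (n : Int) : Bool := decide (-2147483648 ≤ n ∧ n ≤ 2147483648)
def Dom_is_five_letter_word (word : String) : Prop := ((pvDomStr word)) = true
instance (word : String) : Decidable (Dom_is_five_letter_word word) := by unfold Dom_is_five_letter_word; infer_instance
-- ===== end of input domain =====

-- B: one regex full-match [a-z]{5} instead of A's length guard + ord-arithmetic loop (idiomatic; return value only).

-- ===== PORT A =====
-- to_number(c) = ord(c) - ord('a')
def pvToNumber (c : Char) : Int := (c.toNat : Int) - 97

-- the 'for c in word' loop with its early return False
def pvLoopA : List Char → Bool
  | [] => true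
  | c :: cs =>
      let b := pvToNumber c
      if b < 0 ∨ b ≥ 26 then false else pvLoopA cs

def is_five_letter_word (word : String) : Bool :=
  if PySem.Str.len word ≠ 5 then false
  else pvLoopA word.toList

-- ===== PORT B =====
-- re.fullmatch(r'[a-z]{5}', word): exact semantics of this pattern — the whole string
-- is exactly five characters, each in 'a'..'z' (hand-ported; exact for this regex).
def is_five_letter_word_alt (word : String) : Bool :=
  PySem.Str.len word == 5 && word.toList.all (fun c => 'a' ≤ c && c ≤ 'z')

-- ===== PRECONDITION & SPEC =====
def Spec_is_five_letter_word (word : String) (out : Bool) : Prop := out = is_five_letter_word_alt word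
instance (word : String) (out : Bool) : Decidable (Spec_is_five_letter_word word out) := by unfold Spec_is_five_letter_word; infer_instance

-- ===== CLAIM (what is proved, stated in full; the proofs are below) =====
def Claim_equal_is_five_letter_word : Prop := ∀ (word : String), Dom_is_five_letter_word word → Spec_is_five_letter_word word (is_five_letter_word word)

-- ===== LEMMAS AND PROOFS =====

-- ===== VERDICT (by name: the statement is the Claim_ definition above) =====
theorem pvLoopA_eq_all (cs : List Char) :
    pvLoopA cs = cs.all (fun c => 'a' ≤ c && c ≤ 'z') := by
  induction cs with
  | nil => rfl
  | cons c cs ih =>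
      have h97 : ('a' ≤ c) ↔ 97 ≤ c.toNat := by
        rw [Char.le_def, UInt32.le_iff_toNat_le]; exact Iff.rfl
      have h122 : (c ≤ 'z') ↔ c.toNat ≤ 122 := by
        rw [Char.le_def, UInt32.le_iff_toNat_le]; exact Iff.rfl
      simp only [pvLoopA, pvToNumber, List.all_cons, ← ih]
      by_cases h : 97 ≤ c.toNat ∧ c.toNat ≤ 122
      · rw [if_neg (by omega)]
        simp [h97, h122, h.1, h.2]
      · rw [if_pos (by omega)]
        have : ¬(97 ≤ c.toNat) ∨ ¬(c.toNat ≤ 122) := by omega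
        rcases this with h1 | h1 <;> simp [h97, h122, h1]

theorem is_five_letter_word_spec : Claim_equal_is_five_letter_word := by
  intro word _
  unfold Spec_is_five_letter_word is_five_letter_word is_five_letter_word_alt
  rw [pvLoopA_eq_all]
  by_cases h : PySem.Str.len word = 5 <;> simp [PySem.Str.len_eq] at h ⊢ <;> simp [h]
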